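-- pv_equiv track=rewrite | github.com/Dev-Russo/beecrowd | basics/1094.py | somarCobaias
-- ===== SOURCE A (Python) =====
-- def somarCobaias(lista):
--     rato = cobra = sapo =0
--     for experimento in lista:
--         if experimento[1] == "R":
--             rato += experimento[0]
--         elif experimento[1] == "C":
--             cobra += experimento[0]
--         elif experimento[1] == "S":
--             sapo += experimento[0]
--
--     return rato, cobra, sapo
-- ===== SOURCE B (Python) =====
-- def somarCobaias(lista):
--     rato = sum(e[0] for e in lista if e[1] == "R")
--     cobra = sum(e[0] for e in lista if e[1] == "C")
--     sapo = sum(e[0] for e in lista if e[1] == "S")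
--     return rato, cobra, sapo
-- ===== Notes on version B (the rewrite author's own statement) =====
-- stated objective: idiomatic
-- what changed: Replaced the single branching accumulator loop with three independent filtered generator sums, one scan per animal letter.
import Mathlib
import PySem

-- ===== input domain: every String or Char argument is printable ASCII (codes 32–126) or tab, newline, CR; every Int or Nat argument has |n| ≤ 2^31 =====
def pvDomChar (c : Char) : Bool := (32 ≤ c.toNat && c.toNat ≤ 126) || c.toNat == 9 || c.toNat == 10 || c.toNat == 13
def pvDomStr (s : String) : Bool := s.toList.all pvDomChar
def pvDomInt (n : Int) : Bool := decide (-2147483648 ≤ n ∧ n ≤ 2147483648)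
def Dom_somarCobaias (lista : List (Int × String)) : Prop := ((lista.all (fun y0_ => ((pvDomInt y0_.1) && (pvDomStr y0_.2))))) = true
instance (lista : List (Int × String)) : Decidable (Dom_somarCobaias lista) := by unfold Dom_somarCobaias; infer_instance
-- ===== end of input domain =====

-- B replaces A's single branching accumulator loop with three independent filtered sums (idiomatic decomposition; same cost).


-- ===== PORT A =====
-- single pass: fold over the list with accumulator (rato, cobra, sapo), branching on the letter
def somarCobaias (lista : List (Int × String)) : Int × Int × Int :=
  lista.foldl
    (fun (acc : Int × Int × Int) experimento =>
      if experimento.2 = "R" then (acc.1 + experimento.1, acc.2.1, acc.2.2)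
      else if experimento.2 = "C" then (acc.1, acc.2.1 + experimento.1, acc.2.2)
      else if experimento.2 = "S" then (acc.1, acc.2.1, acc.2.2 + experimento.1)
      else acc)
    (0, 0, 0)

-- ===== PORT B =====
-- three independent filtered sums over the same list
def somarCobaias_alt (lista : List (Int × String)) : Int × Int × Int :=
  (((lista.filter (fun e => e.2 = "R")).map (fun e => e.1)).sum,
   ((lista.filter (fun e => e.2 = "C")).map (fun e => e.1)).sum,
   ((lista.filter (fun e => e.2 = "S")).map (fun e => e.1)).sum)

-- ===== PRECONDITION & SPEC =====
def Spec_somarCobaias (lista : List (Int × String)) (out : Int × Int × Int) : Prop := out = somarCobaias_alt lista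
instance (lista : List (Int × String)) (out : Int × Int × Int) : Decidable (Spec_somarCobaias lista out) := by unfold Spec_somarCobaias; infer_instance

-- ===== CLAIM (what is proved, stated in full; the proofs are below) =====
def Claim_equal_somarCobaias : Prop := ∀ (lista : List (Int × String)), Dom_somarCobaias lista → Spec_somarCobaias lista (somarCobaias lista)

-- ===== LEMMAS AND PROOFS =====

-- A's fold from an arbitrary accumulator equals the accumulator plus B's three sums
theorem somarCobaias_fold_general (lista : List (Int × String)) (a b c : Int) :
    lista.foldl
      (fun (acc : Int × Int × Int) experimento =>
        if experimento.2 = "R" then (acc.1 + experimento.1, acc.2.1, acc.2.2)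
        else if experimento.2 = "C" then (acc.1, acc.2.1 + experimento.1, acc.2.2)
        else if experimento.2 = "S" then (acc.1, acc.2.1, acc.2.2 + experimento.1)
        else acc)
      (a, b, c)
    = (a + ((lista.filter (fun e => e.2 = "R")).map (fun e => e.1)).sum,
       b + ((lista.filter (fun e => e.2 = "C")).map (fun e => e.1)).sum,
       c + ((lista.filter (fun e => e.2 = "S")).map (fun e => e.1)).sum) := by
  induction lista generalizing a b c with
  | nil => simp
  | cons hd tl ih =>
    simp only [List.foldl_cons, List.filter_cons]
    split_ifs with h1 h2 h3 <;>
      simp_all [List.map_cons, List.sum_cons, add_assoc, add_left_comm]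

-- ===== VERDICT (by name: the statement is the Claim_ definition above) =====
theorem somarCobaias_spec : Claim_equal_somarCobaias := by
  intro lista _
  unfold Spec_somarCobaias somarCobaias somarCobaias_alt
  rw [somarCobaias_fold_general]
  simp
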